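-- pv_equiv track=rewrite | github.com/dhaliwalg/thymus | scripts/extract-imports.py | _keyword_outside_strings
-- ===== SOURCE A (Python) =====
-- def _keyword_outside_strings(line, keyword):
--     """Return True if *keyword* appears in *line* outside string literals.
--
--     Assumes comments have already been stripped by _strip_comments().
--     """
--     klen = len(keyword)
--     state = 0  # 0=code, 1=single-string, 2=double-string, 3=template
--     i = 0
--     n = len(line)
--
--     while i < n:
--         ch = line[i]
--
--         if state == 0:
--             # Check for keyword at word boundary
--             if line[i:i + klen] == keyword:
--                 before_ok = (i == 0 or not (line[i - 1].isalnum()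
--                                             or line[i - 1] == '_'))
--                 after_idx = i + klen
--                 after_ok = (after_idx >= n or not (line[after_idx].isalnum()
--                                                    or line[after_idx] == '_'))
--                 if before_ok and after_ok:
--                     return True
--             if ch == "'":
--                 state = 1
--             elif ch == '"':
--                 state = 2
--             elif ch == '`':
--                 state = 3
--             i += 1
--
--         elif state == 1:
--             if ch == '\\' and i + 1 < n:
--                 i += 2; continue
--             if ch == "'" or ch == '\n':
--                 state = 0
--             i += 1
--
--         elif state == 2:
--             if ch == '\\' and i + 1 < n:
--                 i += 2; continue
--             if ch == '"' or ch == '\n':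
--                 state = 0
--             i += 1
--
--         elif state == 3:
--             if ch == '\\' and i + 1 < n:
--                 i += 2; continue
--             if ch == '`':
--                 state = 0
--             # Simplified: skip ${...} tracking for keyword detection.
--             # Import keywords inside template expressions are rare.
--             i += 1
--
--         else:
--             i += 1
--
--     return False
-- ===== SOURCE B (Python) =====
-- def _keyword_outside_strings(line, keyword):
--     """Two-pass version: first collect the indices scanned in code state,
--     then check the keyword with word boundaries at those positions."""
--     n = len(line)
--
--     # Pass 1: indices the scanner visits while outside any string literal.
--     code_positions = []
--     state = 0  # 0=code, 1=single-string, 2=double-string, 3=template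
--     i = 0
--     while i < n:
--         ch = line[i]
--         if state == 0:
--             code_positions.append(i)
--             if ch == "'":
--                 state = 1
--             elif ch == '"':
--                 state = 2
--             elif ch == '`':
--                 state = 3
--             i += 1
--         elif ch == '\\' and i + 1 < n:
--             i += 2
--         else:
--             if state == 3:
--                 if ch == '`':
--                     state = 0
--             elif ch == ('"' if state == 2 else "'") or ch == '\n':
--                 state = 0
--             i += 1
--
--     # Pass 2: word-bounded keyword match at any code position.
--     klen = len(keyword)
--     for i in code_positions:
--         if line[i:i + klen] == keyword:
--             before_ok = (i == 0 or not (line[i - 1].isalnum()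
--                                         or line[i - 1] == '_'))
--             j = i + klen
--             after_ok = (j >= n or not (line[j].isalnum() or line[j] == '_'))
--             if before_ok and after_ok:
--                 return True
--     return False
-- ===== Notes on version B (the rewrite author's own statement) =====
-- stated objective: simpler
-- what changed: A interleaves the keyword/word-boundary test with the string-literal state machine inside one while loop; B decomposes it into two passes: first collect the indices the scanner visits in code state, then scan only those positions for a word-bounded raw-substring match.
import Mathlib
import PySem

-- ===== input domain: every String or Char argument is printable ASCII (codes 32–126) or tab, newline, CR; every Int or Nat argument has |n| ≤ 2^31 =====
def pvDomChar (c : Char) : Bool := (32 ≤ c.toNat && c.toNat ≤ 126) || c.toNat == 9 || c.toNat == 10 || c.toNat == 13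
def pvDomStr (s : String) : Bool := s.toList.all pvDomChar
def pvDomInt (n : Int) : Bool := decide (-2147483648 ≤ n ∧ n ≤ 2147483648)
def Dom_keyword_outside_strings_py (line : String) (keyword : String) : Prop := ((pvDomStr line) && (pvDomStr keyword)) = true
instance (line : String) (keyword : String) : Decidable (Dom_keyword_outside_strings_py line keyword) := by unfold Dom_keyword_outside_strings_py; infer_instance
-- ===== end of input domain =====

-- B replaces A's interleaved state machine by two passes (collect code positions,
-- then a word-boundary keyword scan over them); objective: simpler decomposition, same cost.

-- ===== PORT A =====

-- the word-boundary keyword check A performs at index i in code state (same text in both Pythons)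
def pvHit (cs kw : List Char) (n i : Nat) : Bool :=
  ((cs.drop i).take kw.length == kw)       -- line[i:i+klen] == keyword (i, klen ≥ 0: slice = drop/take)
  && (i == 0 || !(PySem.Chars.isalnum (cs.getD (i-1) ' ') || cs.getD (i-1) ' ' == '_'))
  && (n ≤ i + kw.length || !(PySem.Chars.isalnum (cs.getD (i+kw.length) ' ') || cs.getD (i+kw.length) ' ' == '_'))

-- A's while loop, step for step (state 0..3; ch = line[i])
def pvAGo (cs kw : List Char) (n : Nat) (state i : Nat) : Bool :=
  if _h : i < n then
    let ch := cs.getD i ' '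
    if state = 0 then
      if pvHit cs kw n i then true
      else pvAGo cs kw n (if ch = '\'' then 1 else if ch = '"' then 2 else if ch = '`' then 3 else 0) (i+1)
    else if state = 1 then
      if ch = '\\' ∧ i + 1 < n then pvAGo cs kw n 1 (i+2)
      else pvAGo cs kw n (if ch = '\'' ∨ ch = '\n' then 0 else 1) (i+1)
    else if state = 2 then
      if ch = '\\' ∧ i + 1 < n then pvAGo cs kw n 2 (i+2)
      else pvAGo cs kw n (if ch = '"' ∨ ch = '\n' then 0 else 2) (i+1)
    else if state = 3 then
      if ch = '\\' ∧ i + 1 < n then pvAGo cs kw n 3 (i+2)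
      else pvAGo cs kw n (if ch = '`' then 0 else 3) (i+1)
    else pvAGo cs kw n state (i+1)
  else false
termination_by n - i

def keyword_outside_strings_py (line : String) (keyword : String) : Bool :=
  pvAGo line.toList keyword.toList line.toList.length 0 0

-- ===== PORT B =====

-- Pass 1 of Source B: the indices visited while in code state
def pvCodePos (cs : List Char) (n : Nat) (state i : Nat) : List Nat :=
  if _h : i < n then
    let ch := cs.getD i ' '
    if state = 0 then
      i :: pvCodePos cs n (if ch = '\'' then 1 else if ch = '"' then 2 else if ch = '`' then 3 else 0) (i+1)
    else if ch = '\\' ∧ i + 1 < n then pvCodePos cs n state (i+2)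
    else if state = 3 then pvCodePos cs n (if ch = '`' then 0 else 3) (i+1)
    else pvCodePos cs n (if ch = (if state = 2 then '"' else '\'') ∨ ch = '\n' then 0 else state) (i+1)
  else []
termination_by n - i

-- Pass 2 of Source B: word-bounded keyword match at any code position
def pvScan (cs kw : List Char) (n : Nat) : List Nat → Bool
  | [] => false
  | i :: rest => if pvHit cs kw n i then true else pvScan cs kw n rest

def keyword_outside_strings_py_alt (line : String) (keyword : String) : Bool :=
  pvScan line.toList keyword.toList line.toList.length
    (pvCodePos line.toList line.toList.length 0 0)

-- ===== PRECONDITION & SPEC =====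
def Spec_keyword_outside_strings_py (line : String) (keyword : String) (out : Bool) : Prop := out = keyword_outside_strings_py_alt line keyword
instance (line : String) (keyword : String) (out : Bool) : Decidable (Spec_keyword_outside_strings_py line keyword out) := by unfold Spec_keyword_outside_strings_py; infer_instance

-- ===== CLAIM (what is proved, stated in full; the proofs are below) =====
def Claim_equal_keyword_outside_strings_py : Prop := ∀ (line : String) (keyword : String), Dom_keyword_outside_strings_py line keyword → Spec_keyword_outside_strings_py line keyword (keyword_outside_strings_py line keyword)

-- ===== LEMMAS AND PROOFS =====

-- the loop of A equals the scan of B's code-position list, for every reachable state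
theorem pvAGo_eq_scan (cs kw : List Char) (n : Nat) (state i : Nat) (hs : state ≤ 3) :
    pvAGo cs kw n state i = pvScan cs kw n (pvCodePos cs n state i) := by
  unfold pvAGo pvCodePos
  split
  · rename_i h
    interval_cases state
    · simp only [reduceIte]
      rw [pvScan]
      split
      · rfl
      · exact pvAGo_eq_scan cs kw n _ (i+1) (by split_ifs <;> omega)
    · by_cases hb : cs.getD i ' ' = '\\' ∧ i + 1 < n
      · simp only [reduceIte, if_pos hb]
        exact pvAGo_eq_scan cs kw n 1 (i+2) (by omega)
      · simp only [reduceIte, if_neg hb]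
        exact pvAGo_eq_scan cs kw n _ (i+1) (by split_ifs <;> omega)
    · by_cases hb : cs.getD i ' ' = '\\' ∧ i + 1 < n
      · simp only [reduceIte, if_pos hb]
        exact pvAGo_eq_scan cs kw n 2 (i+2) (by omega)
      · simp only [reduceIte, if_neg hb]
        exact pvAGo_eq_scan cs kw n _ (i+1) (by split_ifs <;> omega)
    · by_cases hb : cs.getD i ' ' = '\\' ∧ i + 1 < n
      · simp only [reduceIte, if_pos hb]
        exact pvAGo_eq_scan cs kw n 3 (i+2) (by omega)
      · simp only [reduceIte, if_neg hb]
        exact pvAGo_eq_scan cs kw n _ (i+1) (by split_ifs <;> omega)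
  · rfl
termination_by n - i

-- ===== VERDICT (by name: the statement is the Claim_ definition above) =====
theorem keyword_outside_strings_py_spec : Claim_equal_keyword_outside_strings_py := by
  intro line keyword _
  unfold Spec_keyword_outside_strings_py keyword_outside_strings_py keyword_outside_strings_py_alt
  exact pvAGo_eq_scan _ _ _ 0 0 (by omega)
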